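-- pv_equiv track=rewrite | github.com/kylinlyy/hanlptensorflow | data_reader.py | content_str_2_list
-- ===== SOURCE A (Python) =====
-- def filter_empty(f_list):
--     while " " in f_list:
--         f_list.remove(" ")
--
-- def content_str_2_list(pag_cat_dict):
--     #将目录字典，转化为{长度：[[1],[2]],长度:[[1,1],[1,2]]
--     cat_list = list(pag_cat_dict.keys())
--     cat_ana_dict = {}  # 例如{1: [['1'], ['2'], ['3']], 2: [['1', '1'], ['1', '2'], ['1', '3'], ['2', '1'], ['2', '2'], ['2', '3']], 3: [['2', '2', '1'], ['2', '2', '2'], ['2', '3', '1'], ['2', '3', '2'], ['2', '3', '3']]}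
--     for cl in cat_list:
--         cl_list = cl.split(".")
--         filter_empty(cl_list)
--         cllen = len(cl_list)
--         if cllen in cat_ana_dict.keys():
--             cat_ana_dict[cllen].append(cl_list)
--         else:
--             cat_ana_dict[cllen] = [cl_list]
--     return cat_ana_dict
-- ===== SOURCE B (Python) =====
-- def content_str_2_list(pag_cat_dict):
--     toks = [[t for t in k.split(".") if t != " "] for k in pag_cat_dict]
--     lens = []
--     for t in toks:
--         if len(t) not in lens:
--             lens.append(len(t))
--     return {L: [t for t in toks if len(t) == L] for L in lens}
-- ===== Notes on version B (the rewrite author's own statement) =====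
-- stated objective: alternative
-- what changed: Replaces the incremental dict accumulation (check key, append or create bucket) with a declarative pipeline: clean all token lists once, collect the distinct lengths in first-occurrence order, then build the dict by one filter pass per distinct length.
import Mathlib
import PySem

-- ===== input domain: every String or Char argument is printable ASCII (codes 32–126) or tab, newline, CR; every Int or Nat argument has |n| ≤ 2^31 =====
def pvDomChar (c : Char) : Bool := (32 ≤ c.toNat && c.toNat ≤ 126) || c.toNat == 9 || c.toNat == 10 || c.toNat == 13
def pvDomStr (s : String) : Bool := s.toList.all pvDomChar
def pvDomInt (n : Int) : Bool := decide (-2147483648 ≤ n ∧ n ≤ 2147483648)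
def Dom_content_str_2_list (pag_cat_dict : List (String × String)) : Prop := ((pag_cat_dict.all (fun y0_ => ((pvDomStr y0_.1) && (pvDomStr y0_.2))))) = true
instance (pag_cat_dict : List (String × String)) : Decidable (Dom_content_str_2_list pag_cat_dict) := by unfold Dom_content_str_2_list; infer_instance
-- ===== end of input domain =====

-- B replaces A's incremental dict accumulation by a declarative pipeline
-- (clean all token lists once, collect distinct lengths in first-occurrence
-- order, one filter pass per distinct length); objective: alternative, not faster.

-- ===== PORT A =====
-- termination helper for filter_empty's while-loop (cited by decreasing_by)
theorem pv_remove?_length {α : Type} [BEq α] [LawfulBEq α] (xs l' : List α) (v : α)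
    (h : PySem.List.remove? xs v = some l') : l'.length < xs.length := by
  by_cases hm : v ∈ xs
  · rw [PySem.List.remove?_eq_some_erase xs v hm] at h
    cases h
    exact List.length_erase_of_mem hm ▸ Nat.sub_lt (List.length_pos_of_mem hm) Nat.one_pos
  · rw [(PySem.List.remove?_eq_none_iff xs v).2 hm] at h; cases h

-- while " " in f_list: f_list.remove(" ")
def filter_empty (f_list : List String) : List String :=
  match h : PySem.List.remove? f_list " " with
  | some l' => filter_empty l'
  | none => f_list
termination_by f_list.length
decreasing_by exact pv_remove?_length _ _ _ h

def content_str_2_list (pag_cat_dict : List (String × String)) : List (Int × List (List String)) :=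
  let cat_list := pag_cat_dict.map Prod.fst
  let cat_ana_dict : PySem.Dict Int (List (List String)) :=
    cat_list.foldl (fun d cl =>
      -- cl.split("."): sep "." ≠ "" so split? is always some (exact)
      let cl_list := (PySem.Str.split? cl ".").getD []
      let cl_list := filter_empty cl_list
      let cllen : Int := cl_list.length
      if d.contains cllen then
        d.modify cllen [] (fun v => v ++ [cl_list])  -- cat_ana_dict[cllen].append(cl_list)
      else
        d.insert cllen [cl_list]) PySem.Dict.empty
  cat_ana_dict.items

-- ===== PORT B =====
def content_str_2_list_alt (pag_cat_dict : List (String × String)) : List (Int × List (List String)) :=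
  let toks := pag_cat_dict.map (fun kv =>
    ((PySem.Str.split? kv.1 ".").getD []).filter (fun t => t != " "))
  let lens : List Int :=
    toks.foldl (fun acc t => if (t.length : Int) ∈ acc then acc else acc ++ [(t.length : Int)]) []
  -- dict comprehension over the distinct lengths: keys are distinct, so the dict is this list
  lens.map (fun L => (L, toks.filter (fun t => (t.length : Int) == L)))

-- ===== PRECONDITION & SPEC =====
def Spec_content_str_2_list (pag_cat_dict : List (String × String)) (out : List (Int × List (List String))) : Prop := out = content_str_2_list_alt pag_cat_dict
instance (pag_cat_dict : List (String × String)) (out : List (Int × List (List String))) : Decidable (Spec_content_str_2_list pag_cat_dict out) := by unfold Spec_content_str_2_list; infer_instance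

-- ===== CLAIM (what is proved, stated in full; the proofs are below) =====
def Claim_equal_content_str_2_list : Prop := ∀ (pag_cat_dict : List (String × String)), Dom_content_str_2_list pag_cat_dict → Spec_content_str_2_list pag_cat_dict (content_str_2_list pag_cat_dict)

-- ===== LEMMAS AND PROOFS =====

-- the while-remove loop removes exactly the " " entries
theorem filter_empty_eq (l : List String) : filter_empty l = l.filter (fun t => t != " ") := by
  induction l using filter_empty.induct with
  | case1 l l' h ih =>
      have hm : " " ∈ l := by
        by_contra hn
        rw [(PySem.List.remove?_eq_none_iff l " ").2 hn] at h; cases h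
      rw [PySem.List.remove?_eq_some_erase l " " hm] at h
      cases h
      rw [filter_empty, PySem.List.remove?_eq_some_erase l " " hm]
      show filter_empty (l.erase " ") = _
      rw [ih]
      -- filtering out " " ignores erasing one " "
      clear ih hm
      induction l with
      | nil => rfl
      | cons x xs ihx =>
          by_cases hx : x = " "
          · subst hx; simp
          · simp [hx, ihx]
  | case2 l h =>
      rw [filter_empty, h]
      show l = _
      have hn : " " ∉ l := (PySem.List.remove?_eq_none_iff l " ").1 h
      symm
      exact List.filter_eq_self.2 (fun a ha => by
        simp only [bne_iff_ne, ne_eq]; exact fun e => hn (e ▸ ha))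

-- abbreviation used only in the proofs
def pvTok (cl : String) : List String :=
  ((PySem.Str.split? cl ".").getD []).filter (fun t => t != " ")

-- A's loop body equals a dict `modify` at the token-list's length
theorem pv_step_eq_modify (d : PySem.Dict Int (List (List String))) (t : List String) :
    (if d.contains (t.length : Int) then
        d.modify (t.length : Int) [] (fun v => v ++ [t])
      else d.insert (t.length : Int) [t])
    = d.modify (t.length : Int) [] (fun v => v ++ [t]) := by
  by_cases h : d.contains (t.length : Int)
  · simp [h]
  · have hc : d.contains (t.length : Int) = false := by simpa using h
    rw [if_neg (by simp [hc])]
    simp [PySem.Dict.modify, PySem.Dict.getD_of_not_contains d [] hc]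

-- B's append-if-absent fold is the PySem.Set add fold
theorem pv_lens_eq_set (toks : List (List String)) (acc : List Int) :
    toks.foldl (fun acc t =>
        if (t.length : Int) ∈ acc then acc else acc ++ [(t.length : Int)]) acc
    = toks.foldl (fun s t => PySem.Set.add s ((t.length : Int))) acc := by
  induction toks generalizing acc with
  | nil => rfl
  | cons x xs ih =>
      simp only [List.foldl_cons]
      rw [ih]
      congr 1
      by_cases hx : (x.length : Int) ∈ acc <;>
        simp [PySem.Set.add, List.contains_eq_mem, hx]

-- grouping fold's items = map over the distinct keys (first-occurrence order) of one filter each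
theorem pv_items (toks : List (List String)) :
    (toks.foldl (fun d t => d.modify (t.length : Int) [] (fun v => v ++ [t]))
        (PySem.Dict.empty : PySem.Dict Int (List (List String)))).items
    = (toks.foldl (fun acc t =>
          if (t.length : Int) ∈ acc then acc else acc ++ [(t.length : Int)]) []).map
        (fun L => (L, toks.filter (fun t => (t.length : Int) == L))) := by
  have hpair : toks.foldl (fun d t => d.modify (t.length : Int) [] (fun v => v ++ [t]))
        (PySem.Dict.empty : PySem.Dict Int (List (List String)))
      = (toks.map (fun t => ((t.length : Int), t))).foldl
          (fun d p => d.modify p.1 [] (fun v => v ++ [p.2])) PySem.Dict.empty := by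
    rw [List.foldl_map]
  rw [hpair]
  set l := toks.map (fun t => ((t.length : Int), t)) with hl
  set D := l.foldl (fun d p => d.modify p.1 [] (fun v => v ++ [p.2])) PySem.Dict.empty with hD
  have hkeys : D.keys = PySem.Set.update PySem.Dict.empty.keys (l.map Prod.fst) :=
    PySem.Dict.keys_foldl_modify_key l Prod.fst [] (fun _ p v => v ++ [p.2]) PySem.Dict.empty
  have hnodup : D.keys.Nodup :=
    PySem.Dict.nodup_keys_foldl_modify_key l Prod.fst [] (fun _ p v => v ++ [p.2])
      PySem.Dict.empty (by simp)
  have hgetD : ∀ c : Int, D.getD c [] = toks.filter (fun t => (t.length : Int) == c) := by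
    intro c
    rw [hD, PySem.Dict.getD_foldl_modify_append l PySem.Dict.empty c]
    simp [hl, List.filter_map, List.map_map, Function.comp_def]
  have hlens : toks.foldl (fun acc t =>
        if (t.length : Int) ∈ acc then acc else acc ++ [(t.length : Int)]) []
      = PySem.Set.update (PySem.Dict.empty : PySem.Dict Int (List (List String))).keys
          (l.map Prod.fst) := by
    have hmap : l.map Prod.fst = toks.map (fun t => ((t.length : Int))) := by
      simp [hl, List.map_map, Function.comp_def]
    rw [hmap, PySem.Set.update, List.foldl_map]
    simpa [PySem.Dict.keys_empty] using pv_lens_eq_set toks []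
  rw [hlens, ← hkeys, PySem.Dict.items_eq_map_keys D hnodup []]
  exact List.map_congr_left (fun k _ => by rw [hgetD k])

theorem content_str_2_list_total (pag_cat_dict : List (String × String)) :
    content_str_2_list pag_cat_dict = content_str_2_list_alt pag_cat_dict := by
  simp only [content_str_2_list, content_str_2_list_alt, filter_empty_eq]
  have htoks : pag_cat_dict.map (fun kv =>
        ((PySem.Str.split? kv.1 ".").getD []).filter (fun t => t != " "))
      = (pag_cat_dict.map Prod.fst).map pvTok := by
    simp [List.map_map, pvTok, Function.comp_def]
  rw [htoks]
  have hA : (pag_cat_dict.map Prod.fst).foldl (fun d cl =>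
        let cl_list := (PySem.Str.split? cl ".").getD []
        let cl_list := cl_list.filter (fun t => t != " ")
        let cllen : Int := cl_list.length
        if d.contains cllen then d.modify cllen [] (fun v => v ++ [cl_list])
        else d.insert cllen [cl_list])
        (PySem.Dict.empty : PySem.Dict Int (List (List String)))
      = ((pag_cat_dict.map Prod.fst).map pvTok).foldl
          (fun d t => d.modify (t.length : Int) [] (fun v => v ++ [t])) PySem.Dict.empty := by
    calc (pag_cat_dict.map Prod.fst).foldl _ _
        = (pag_cat_dict.map Prod.fst).foldl (fun d cl =>
            d.modify ((pvTok cl).length : Int) [] (fun v => v ++ [pvTok cl]))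
            PySem.Dict.empty :=
          PySem.List.foldl_congr_mem _ _ _ _ (fun d cl _ => pv_step_eq_modify d (pvTok cl))
      _ = _ := (List.foldl_map (f := pvTok)
            (g := fun (d : PySem.Dict Int (List (List String))) t =>
              d.modify ((t.length : Int)) [] (fun v => v ++ [t]))).symm
  rw [hA, pv_items]

-- ===== VERDICT (by name: the statement is the Claim_ definition above) =====
theorem content_str_2_list_spec : Claim_equal_content_str_2_list := by
  intro d _
  unfold Spec_content_str_2_list
  exact content_str_2_list_total d
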